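-- pv_equiv track=rewrite | github.com/flagos-ai/FlagDNN | src/flag_dnn/ops/binary.py | collapse_dims
-- ===== SOURCE A (Python) =====
-- def collapse_dims(shape, strides_a, strides_b):
--     if not shape:
--         return [1], [0], [0]
--
--     c_shape, c_str_a, c_str_b = [], [], []
--
--     # 从内向外 (从右向左) 遍历维度
--     for i in reversed(range(len(shape))):
--         s = shape[i]
--
--         # 直接丢弃所有大小为 1 的维度，因为它对内存偏移的贡献是 0
--         if s == 1:
--             continue
--
--         if not c_shape:
--             # 初始化最内层维度
--             c_shape.append(s)
--             c_str_a.append(strides_a[i])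
--             c_str_b.append(strides_b[i])
--         else:
--             prev_shape = c_shape[-1]
--             # 判断当前维度与前一个维度在内存上是否连续
--             # 连续的条件：当前维度的 stride == 前一个维度的 stride * 前一个维度的 size
--             is_contig_a = (strides_a[i] == c_str_a[-1] * prev_shape)
--             is_contig_b = (strides_b[i] == c_str_b[-1] * prev_shape)
--
--             if is_contig_a and is_contig_b:
--                 # 坍缩，将当前维度乘入上一个维度，stride 保持为最内层 stride
--                 c_shape[-1] *= s
--             else:
--                 # 无法连续，作为一个新的独立维度加入
--                 c_shape.append(s)
--                 c_str_a.append(strides_a[i])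
--                 c_str_b.append(strides_b[i])
--
--     if not c_shape: # 如果全都是 1
--         return [1], [0], [0]
--
--     # 因为是从右向左遍历，最后需要翻转回来
--     return c_shape[::-1], c_str_a[::-1], c_str_b[::-1]
-- ===== SOURCE B (Python) =====
-- def contiguous(outer, inner):
--     # the outer dim sits directly on top of the inner dim in both tensors' memory
--     s, a, b = inner
--     return outer[1] == a * s and outer[2] == b * s
--
--
-- def segments(dims):
--     # divide and conquer: split the dim list in half, segment each half into
--     # maximal contiguous runs, then stitch the two halves, fusing the boundary
--     # runs when the halves are contiguous across the cut (grouping is local,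
--     # so the split point does not matter)
--     if len(dims) <= 1:
--         return [dims] if dims else []
--     mid = len(dims) // 2
--     left = segments(dims[:mid])
--     right = segments(dims[mid:])
--     if contiguous(left[-1][-1], right[0][0]):
--         return left[:-1] + [left[-1] + right[0]] + right[1:]
--     return left + right
--
--
-- def size_product(seg):
--     p = 1
--     for s, _, _ in seg:
--         p *= s
--     return p
--
--
-- def collapse_dims(shape, strides_a, strides_b):
--     dims = [d for d in zip(shape, strides_a, strides_b) if d[0] != 1]
--     if not dims:
--         return [1], [0], [0]
--     segs = segments(dims)
--     return ([size_product(seg) for seg in segs],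
--             [seg[-1][1] for seg in segs],
--             [seg[-1][2] for seg in segs])
-- ===== Notes on version B (the rewrite author's own statement) =====
-- stated objective: alternative
-- what changed: B replaces A's reversed on-line stack merge (accumulated group shape/stride, final [::-1] reversal) by a divide-and-conquer segmentation: filter out size-1 dims, recursively split the dim list in half, segment each half into maximal runs under the pairwise contiguity relation, stitch the halves by fusing the boundary runs, then aggregate each run (product of sizes, strides of its innermost element) with comprehensions.
import Mathlib
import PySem

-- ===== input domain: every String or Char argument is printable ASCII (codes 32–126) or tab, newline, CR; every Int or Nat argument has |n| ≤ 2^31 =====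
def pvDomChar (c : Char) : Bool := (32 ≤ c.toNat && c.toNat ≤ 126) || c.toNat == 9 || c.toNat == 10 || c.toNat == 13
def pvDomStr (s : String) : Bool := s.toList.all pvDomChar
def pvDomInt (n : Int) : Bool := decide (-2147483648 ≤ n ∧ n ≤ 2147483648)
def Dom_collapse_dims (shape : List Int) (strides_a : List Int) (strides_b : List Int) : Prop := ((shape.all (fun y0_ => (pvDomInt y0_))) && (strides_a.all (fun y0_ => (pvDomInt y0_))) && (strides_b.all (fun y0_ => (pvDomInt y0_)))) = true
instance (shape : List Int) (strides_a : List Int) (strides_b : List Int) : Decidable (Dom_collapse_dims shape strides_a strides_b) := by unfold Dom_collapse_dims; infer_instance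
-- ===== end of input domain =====

-- B collapses dims by a different algorithm (filter size-1 dims, divide-and-conquer split into
-- maximal pairwise-contiguous runs, then aggregate each run); equal return values proved on Pre_.

-- ===== PORT A =====
-- A's loop body for index i with s = shape[i], a = strides_a[i], b = strides_b[i]
def astep (s a b : Int) (acc : List Int × List Int × List Int) : List Int × List Int × List Int :=
  let cs := acc.1; let ca := acc.2.1; let cb := acc.2.2
  if s = 1 then acc
  else if cs = [] then (cs ++ [s], ca ++ [a], cb ++ [b])
  else
    let prev := cs.getLastD 0
    if a = ca.getLastD 0 * prev ∧ b = cb.getLastD 0 * prev then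
      (cs.dropLast ++ [prev * s], ca, cb)
    else (cs ++ [s], ca ++ [a], cb ++ [b])

def collapse_dims (shape : List Int) (strides_a : List Int) (strides_b : List Int) : List Int × List Int × List Int :=
  if shape = [] then ([1], [0], [0])
  else
    let st := ((List.range shape.length).reverse).foldl
      (fun acc i => astep (shape.getD i 0) (strides_a.getD i 0) (strides_b.getD i 0) acc)
      ([], [], [])
    if st.1 = [] then ([1], [0], [0])
    else ((PySem.List.slice? st.1 none none (-1)).getD [],
          (PySem.List.slice? st.2.1 none none (-1)).getD [],
          (PySem.List.slice? st.2.2 none none (-1)).getD [])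

-- ===== PORT B =====
-- Source B's `contiguous(outer, inner)`
def pvContig (x y : Int × Int × Int) : Bool :=
  x.2.1 == y.2.1 * y.1 && x.2.2 == y.2.2 * y.1

-- Source B's cleaning pass: `[d for d in zip(shape, strides_a, strides_b) if d[0] != 1]`
def ds3 (shape : List Int) (strides_a : List Int) (strides_b : List Int) : List (Int × Int × Int) :=
  (shape.zip (strides_a.zip strides_b)).filter (fun d => d.1 != 1)

-- Source B's `segments`: divide and conquer into maximal contiguous runs.
-- Python's `left[-1][-1]` / `right[0][0]` indexings are on provably nonempty lists here,
-- so getLastD/headD defaults are unreachable; slices dims[:mid]/dims[mid:] with 0 ≤ mid ≤ len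
-- are exactly take/drop.
def segs_dc (dims : List (Int × Int × Int)) : List (List (Int × Int × Int)) :=
  if _h : dims.length ≤ 1 then if dims = [] then [] else [dims]
  else
    let mid := dims.length / 2
    let left := segs_dc (dims.take mid)
    let right := segs_dc (dims.drop mid)
    if pvContig ((left.getLastD []).getLastD (0, 0, 0)) ((right.headD []).headD (0, 0, 0))
    then left.dropLast ++ [left.getLastD [] ++ right.headD []] ++ right.tail
    else left ++ right
termination_by dims.length
decreasing_by
  · simp only [List.length_take]; omega
  · simp only [List.length_drop]; omega

def collapse_dims_alt (shape : List Int) (strides_a : List Int) (strides_b : List Int) : List Int × List Int × List Int :=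
  let dims := ds3 shape strides_a strides_b
  if dims = [] then ([1], [0], [0])
  else
    let segs := segs_dc dims
    (segs.map (fun seg => seg.foldl (fun p d => p * d.1) 1),   -- size_product(seg)
     segs.map (fun seg => (seg.getLastD (0, 0, 0)).2.1),       -- seg[-1][1]
     segs.map (fun seg => (seg.getLastD (0, 0, 0)).2.2))       -- seg[-1][2]

-- ===== PRECONDITION & SPEC =====
-- Pre_ excludes exactly the inputs where A raises IndexError: a dimension of size ≠ 1 whose
-- index lies beyond one of the stride lists.
def Pre_collapse_dims (shape : List Int) (strides_a : List Int) (strides_b : List Int) : Prop :=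
  ∀ i < shape.length, shape.getD i 0 = 1 ∨ (i < strides_a.length ∧ i < strides_b.length)
instance (shape : List Int) (strides_a : List Int) (strides_b : List Int) : Decidable (Pre_collapse_dims shape strides_a strides_b) := by unfold Pre_collapse_dims; infer_instance

def pvWitness_collapse_dims : List Int × List Int × List Int := ([2, 3], [3, 1], [3, 1])

def Spec_collapse_dims (shape : List Int) (strides_a : List Int) (strides_b : List Int) (out : List Int × List Int × List Int) : Prop := out = collapse_dims_alt shape strides_a strides_b
instance (shape : List Int) (strides_a : List Int) (strides_b : List Int) (out : List Int × List Int × List Int) : Decidable (Spec_collapse_dims shape strides_a strides_b out) := by unfold Spec_collapse_dims; infer_instance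

-- ===== CLAIM (what is proved, stated in full; the proofs are below) =====
def Claim_equal_collapse_dims : Prop := ∀ (shape : List Int) (strides_a : List Int) (strides_b : List Int), Dom_collapse_dims shape strides_a strides_b → Pre_collapse_dims shape strides_a strides_b → Spec_collapse_dims shape strides_a strides_b (collapse_dims shape strides_a strides_b)

-- ===== LEMMAS AND PROOFS =====

-- A's logical grouping, recursion from the head (outermost dim of the processed suffix)
def stepA (d : Int × Int × Int) (g : List (Int × Int × Int)) : List (Int × Int × Int) :=
  match g with
  | [] => [d]
  | h :: t =>
      if d.2.1 = h.2.1 * h.1 ∧ d.2.2 = h.2.2 * h.1 then (h.1 * d.1, h.2.1, h.2.2) :: t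
      else d :: h :: t

-- head-recursive specification of run splitting
def runs : List (Int × Int × Int) → List (List (Int × Int × Int))
  | [] => []
  | [x] => [[x]]
  | x :: y :: t =>
      match runs (y :: t) with
      | r :: rs => if pvContig x (r.headD (0, 0, 0)) then (x :: r) :: rs else [x] :: r :: rs
      | [] => [[x]]

-- the fusion step of segs_dc, as a function
def glue (L R : List (List (Int × Int × Int))) : List (List (Int × Int × Int)) :=
  if pvContig ((L.getLastD []).getLastD (0, 0, 0)) ((R.headD []).headD (0, 0, 0))
  then L.dropLast ++ [L.getLastD [] ++ R.headD []] ++ R.tail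
  else L ++ R

-- the aggregation of one run: (product of sizes, strides of the innermost element)
def mg (seg : List (Int × Int × Int)) : Int × Int × Int :=
  (seg.foldl (fun p d => p * d.1) 1, (seg.getLastD (0, 0, 0)).2.1, (seg.getLastD (0, 0, 0)).2.2)

lemma runs_head : ∀ (t : List (Int × Int × Int)) (y : Int × Int × Int),
    ∃ r rs, runs (y :: t) = (y :: r) :: rs := by
  intro t
  induction t with
  | nil => intro y; exact ⟨[], [], rfl⟩
  | cons z t' ih =>
      intro y
      obtain ⟨r, rs, hr⟩ := ih z
      simp only [runs, hr]
      by_cases hc : pvContig y ((z :: r).headD (0, 0, 0)) = true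
      · exact ⟨z :: r, rs, by rw [if_pos hc]⟩
      · exact ⟨[], (z :: r) :: rs, by rw [if_neg hc]⟩

lemma runs_chain : ∀ (ds : List (Int × Int × Int)) (seg : List (Int × Int × Int)),
    seg ∈ runs ds → List.IsChain (fun a b => pvContig a b = true) seg := by
  intro ds
  induction ds with
  | nil => simp [runs]
  | cons x t ih =>
      intro seg hseg
      cases t with
      | nil =>
          simp only [runs, List.mem_singleton] at hseg
          simp [hseg]
      | cons z t' =>
          obtain ⟨r, rs, hr⟩ := runs_head t' z
          simp only [runs, hr] at hseg
          have hzr : List.IsChain (fun a b => pvContig a b = true) (z :: r) :=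
            ih (z :: r) (by rw [hr]; exact List.mem_cons_self)
          have hrs : ∀ s ∈ rs, List.IsChain (fun a b => pvContig a b = true) s := by
            intro s hs
            exact ih s (by rw [hr]; exact List.mem_cons_of_mem _ hs)
          by_cases hc : pvContig x ((z :: r).headD (0, 0, 0)) = true
          · rw [if_pos hc] at hseg
            rcases List.mem_cons.mp hseg with h1 | h2
            · subst h1
              exact List.isChain_cons_cons.mpr ⟨by simpa using hc, hzr⟩
            · exact hrs _ h2
          · rw [if_neg hc] at hseg
            rcases List.mem_cons.mp hseg with h1 | h2
            · subst h1; simp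
            · rcases List.mem_cons.mp h2 with h3 | h4
              · subst h3; exact hzr
              · exact hrs _ h4

lemma foldl_mul_init : ∀ (l : List (Int × Int × Int)) (c : Int),
    l.foldl (fun p d => p * d.1) c = c * l.foldl (fun p d => p * d.1) 1 := by
  intro l
  induction l with
  | nil => intro c; simp
  | cons h t ih =>
      intro c
      simp only [List.foldl_cons]
      rw [ih (c * h.1), ih (1 * h.1)]
      ring

lemma chain_mul : ∀ (l : List (Int × Int × Int)) (x : Int × Int × Int),
    List.IsChain (fun a b => pvContig a b = true) (x :: l) →
    ((x :: l).getLastD (0, 0, 0)).2.1 * (x :: l).foldl (fun p d => p * d.1) 1 = x.2.1 * x.1 ∧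
    ((x :: l).getLastD (0, 0, 0)).2.2 * (x :: l).foldl (fun p d => p * d.1) 1 = x.2.2 * x.1 := by
  intro l
  induction l with
  | nil => intro x _; simp
  | cons y t ih =>
      intro x hch
      have hxy : pvContig x y = true := by
        have := List.isChain_cons_cons.mp hch
        exact this.1
      have hrest := ih y (List.isChain_cons_cons.mp hch).2
      have hx1 : x.2.1 = y.2.1 * y.1 := by
        simp only [pvContig, Bool.and_eq_true, beq_iff_eq] at hxy
        exact hxy.1
      have hx2 : x.2.2 = y.2.2 * y.1 := by
        simp only [pvContig, Bool.and_eq_true, beq_iff_eq] at hxy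
        exact hxy.2
      have hlast : ((x :: y :: t).getLastD (0, 0, 0)) = ((y :: t).getLastD (0, 0, 0)) := by
        simp
      have hfold : (x :: y :: t).foldl (fun p d => p * d.1) 1
          = x.1 * (y :: t).foldl (fun p d => p * d.1) 1 := by
        simp only [List.foldl_cons]
        rw [foldl_mul_init t (1 * x.1 * y.1), foldl_mul_init t (1 * y.1)]
        ring
      rw [hlast, hfold]
      constructor
      · calc ((y :: t).getLastD (0, 0, 0)).2.1 * (x.1 * (y :: t).foldl (fun p d => p * d.1) 1)
            = x.1 * (((y :: t).getLastD (0, 0, 0)).2.1 * (y :: t).foldl (fun p d => p * d.1) 1) := by ring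
          _ = x.1 * (y.2.1 * y.1) := by rw [hrest.1]
          _ = x.2.1 * x.1 := by rw [hx1]; ring
      · calc ((y :: t).getLastD (0, 0, 0)).2.2 * (x.1 * (y :: t).foldl (fun p d => p * d.1) 1)
            = x.1 * (((y :: t).getLastD (0, 0, 0)).2.2 * (y :: t).foldl (fun p d => p * d.1) 1) := by ring
          _ = x.1 * (y.2.2 * y.1) := by rw [hrest.2]
          _ = x.2.2 * x.1 := by rw [hx2]; ring

lemma foldr_stepA_eq_runs (ds : List (Int × Int × Int)) :
    List.foldr stepA [] ds = (runs ds).map mg := by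
  induction ds with
  | nil => rfl
  | cons d t ih =>
      rw [List.foldr_cons, ih]
      cases t with
      | nil => simp [runs, stepA, mg]
      | cons y t' =>
          obtain ⟨r, rs, hr⟩ := runs_head t' y
          have hch : List.IsChain (fun a b => pvContig a b = true) (y :: r) :=
            runs_chain (y :: t') (y :: r) (by rw [hr]; exact List.mem_cons_self)
          have hcm := chain_mul r y hch
          simp only [hr, List.map_cons, stepA, runs]
          have hcond : (d.2.1 = (mg (y :: r)).2.1 * (mg (y :: r)).1 ∧
              d.2.2 = (mg (y :: r)).2.2 * (mg (y :: r)).1) ↔ pvContig d y = true := by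
            simp only [mg, pvContig, Bool.and_eq_true, beq_iff_eq]
            rw [hcm.1, hcm.2]
          by_cases hc : pvContig d y = true
          · rw [if_pos (hcond.mpr hc)]
            have hcy : pvContig d ((y :: r).headD (0, 0, 0)) = true := by simpa using hc
            rw [if_pos hcy, List.map_cons]
            congr 1
            simp only [mg]
            refine Prod.ext ?_ (Prod.ext ?_ ?_)
            · show (mg (y :: r)).1 * d.1 = (d :: y :: r).foldl (fun p d => p * d.1) 1
              simp only [mg, List.foldl_cons]
              rw [foldl_mul_init r (1 * d.1 * y.1), foldl_mul_init r (1 * y.1)]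
              ring
            · show (mg (y :: r)).2.1 = ((d :: y :: r).getLastD (0, 0, 0)).2.1
              simp [mg]
            · show (mg (y :: r)).2.2 = ((d :: y :: r).getLastD (0, 0, 0)).2.2
              simp [mg]
          · rw [if_neg (fun hcc => hc (hcond.mp hcc))]
            have hcy : ¬ pvContig d ((y :: r).headD (0, 0, 0)) = true := by simpa using hc
            rw [if_neg hcy, List.map_cons, List.map_cons]
            congr 1
            simp [mg]

-- stepR: one head-extension step of runs, as a function
def stepR (x : Int × Int × Int) (M : List (List (Int × Int × Int))) : List (List (Int × Int × Int)) :=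
  match M with
  | m :: ms => if pvContig x (m.headD (0, 0, 0)) then (x :: m) :: ms else [x] :: m :: ms
  | [] => [[x]]

lemma runs_cons₂ (x y : Int × Int × Int) (t : List (Int × Int × Int)) :
    runs (x :: y :: t) = stepR x (runs (y :: t)) := rfl

lemma glue_cons (c : List (Int × Int × Int)) (L R : List (List (Int × Int × Int))) (h : L ≠ []) :
    glue (c :: L) R = c :: glue L R := by
  cases L with
  | nil => exact absurd rfl h
  | cons m ms =>
      simp only [glue, List.getLastD_cons, List.dropLast_cons₂]
      split_ifs <;> simp

lemma stepR_glue (x w v : Int × Int × Int) (s u : List (Int × Int × Int))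
    (ss uu : List (List (Int × Int × Int))) :
    stepR x (glue ((w :: s) :: ss) ((v :: u) :: uu))
      = glue (stepR x ((w :: s) :: ss)) ((v :: u) :: uu) := by
  cases ss with
  | nil =>
      by_cases hC : pvContig ((w :: s).getLast?.getD (0, 0, 0)) v = true <;>
      by_cases hx : pvContig x w = true <;>
        simp [glue, stepR, hC, hx]
  | cons p ps =>
      rw [glue_cons (w :: s) (p :: ps) _ (by simp)]
      simp only [stepR, List.headD_cons]
      by_cases hx : pvContig x w = true
      · rw [if_pos hx, if_pos hx, glue_cons (x :: w :: s) (p :: ps) _ (by simp)]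
      · rw [if_neg hx, if_neg hx,
          glue_cons [x] ((w :: s) :: p :: ps) _ (by simp),
          glue_cons (w :: s) (p :: ps) _ (by simp)]

lemma runs_glue : ∀ (l r : List (Int × Int × Int)), l ≠ [] → r ≠ [] →
    runs (l ++ r) = glue (runs l) (runs r) := by
  intro l
  induction l with
  | nil => intro r h _; exact absurd rfl h
  | cons x l' ih =>
      intro r _ hr
      cases r with
      | nil => exact absurd rfl hr
      | cons v r' =>
          obtain ⟨u, uu, hu⟩ := runs_head r' v
          cases l' with
          | nil =>
              show runs (x :: v :: r') = glue (runs [x]) (runs (v :: r'))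
              rw [runs_cons₂, hu]
              show stepR x ((v :: u) :: uu) = glue [[x]] ((v :: u) :: uu)
              by_cases hx : pvContig x v = true <;> simp [stepR, glue, hx]
          | cons w l'' =>
              obtain ⟨sₗ, ssₗ, hw⟩ := runs_head l'' w
              have hstep : runs ((x :: w :: l'') ++ (v :: r'))
                  = stepR x (runs ((w :: l'') ++ (v :: r'))) := by
                simp only [List.cons_append]
                rw [runs_cons₂]
              rw [hstep, ih (v :: r') (by simp) (by simp), hw, hu, stepR_glue,
                ← hu, ← hw, ← runs_cons₂]

lemma segs_dc_eq_runs (dims : List (Int × Int × Int)) : segs_dc dims = runs dims := by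
  generalize hn : dims.length = n
  induction n using Nat.strong_induction_on generalizing dims with
  | _ n ih =>
    rw [segs_dc]
    by_cases h1 : dims.length ≤ 1
    · rw [dif_pos h1]
      cases dims with
      | nil => simp [runs]
      | cons a t =>
          cases t with
          | nil => simp [runs]
          | cons b t' => simp at h1
    · rw [dif_neg h1]
      dsimp only
      have hlen2 : 2 ≤ dims.length := by omega
      have hmid1 : 1 ≤ dims.length / 2 := by omega
      have hmid2 : dims.length / 2 < dims.length := by omega
      have hta : (dims.take (dims.length / 2)).length < n := by
        rw [List.length_take]; omega
      have htb : (dims.drop (dims.length / 2)).length < n := by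
        rw [List.length_drop]; omega
      rw [ih _ hta _ rfl, ih _ htb _ rfl]
      have htne : dims.take (dims.length / 2) ≠ [] := by
        intro hcon
        have := congrArg List.length hcon
        rw [List.length_take] at this
        simp only [List.length_nil] at this
        omega
      have hdne : dims.drop (dims.length / 2) ≠ [] := by
        intro hcon
        have := congrArg List.length hcon
        rw [List.length_drop] at this
        simp only [List.length_nil] at this
        omega
      have hglue := runs_glue (dims.take (dims.length / 2)) (dims.drop (dims.length / 2)) htne hdne
      rw [List.take_append_drop] at hglue
      rw [show (glue (runs (dims.take (dims.length / 2))) (runs (dims.drop (dims.length / 2)))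
            : List (List (Int × Int × Int)))
          = if pvContig (((runs (dims.take (dims.length / 2))).getLastD []).getLastD (0, 0, 0))
              (((runs (dims.drop (dims.length / 2))).headD []).headD (0, 0, 0))
            then (runs (dims.take (dims.length / 2))).dropLast
                ++ [(runs (dims.take (dims.length / 2))).getLastD []
                    ++ (runs (dims.drop (dims.length / 2))).headD []]
                ++ (runs (dims.drop (dims.length / 2))).tail
            else runs (dims.take (dims.length / 2)) ++ runs (dims.drop (dims.length / 2))
          from rfl] at hglue
      exact hglue.symm

lemma runs_nil_iff (ds : List (Int × Int × Int)) : runs ds = [] ↔ ds = [] := by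
  cases ds with
  | nil => simp [runs]
  | cons y t =>
      obtain ⟨r, rs, hr⟩ := runs_head t y
      simp [hr]

-- A's loop state as the reversed unzip of a triple list
def toRev (g : List (Int × Int × Int)) : List Int × List Int × List Int :=
  ((g.map (·.1)).reverse, (g.map (·.2.1)).reverse, (g.map (·.2.2)).reverse)

lemma astep_one (a b : Int) (acc : List Int × List Int × List Int) : astep 1 a b acc = acc := by
  simp [astep]

lemma astep_toRev (s a b : Int) (hs : s ≠ 1) (g : List (Int × Int × Int)) :
    astep s a b (toRev g) = toRev (stepA (s, a, b) g) := by
  match g with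
  | [] => simp [astep, toRev, stepA, hs]
  | h :: t =>
      simp only [astep, toRev, stepA, List.map_cons, List.reverse_cons, hs, if_false]
      have hne : (List.map (·.1) t).reverse ++ [h.1] ≠ [] := by simp
      rw [if_neg hne]
      simp only [List.getLastD_concat, List.dropLast_concat]
      split_ifs <;> simp [mul_comm]

lemma getD_succ_tail (l : List Int) (i : Nat) : l.getD (i + 1) 0 = l.tail.getD i 0 := by
  cases l <;> simp

lemma ds3_cons_one (sh : List Int) (sa sb : List Int) :
    ds3 (1 :: sh) sa sb = ds3 sh sa.tail sb.tail := by
  cases sa with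
  | nil => simp [ds3]
  | cons a sa' =>
      cases sb with
      | nil => simp [ds3]
      | cons b sb' => simp [ds3]

lemma loopA (shape : List Int) : ∀ (sa sb : List Int), Pre_collapse_dims shape sa sb →
    List.foldr (fun i acc => astep (shape.getD i 0) (sa.getD i 0) (sb.getD i 0) acc) ([], [], [])
      (List.range shape.length)
    = toRev (List.foldr stepA [] (ds3 shape sa sb)) := by
  induction shape with
  | nil => intro sa sb _; simp [ds3, toRev]
  | cons x sh ih =>
      intro sa sb hpre
      have hpre' : Pre_collapse_dims sh sa.tail sb.tail := by
        intro i hi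
        have := hpre (i + 1) (by simpa using Nat.succ_lt_succ hi)
        rcases this with h1 | h2
        · left; simpa using h1
        · right
          constructor <;> · cases sa <;> cases sb <;> simp_all
      rw [List.length_cons, List.range_succ_eq_map, List.foldr_cons, List.foldr_map]
      have hbody : (List.foldr (fun i acc => astep ((x :: sh).getD (i + 1) 0) (sa.getD (i + 1) 0) (sb.getD (i + 1) 0) acc)
            ([], [], []) (List.range sh.length))
          = List.foldr (fun i acc => astep (sh.getD i 0) (sa.tail.getD i 0) (sb.tail.getD i 0) acc)
            ([], [], []) (List.range sh.length) := by
        have hfun : (fun (i : Nat) (acc : List Int × List Int × List Int) =>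
              astep ((x :: sh).getD (i + 1) 0) (sa.getD (i + 1) 0) (sb.getD (i + 1) 0) acc)
            = fun i acc => astep (sh.getD i 0) (sa.tail.getD i 0) (sb.tail.getD i 0) acc := by
          funext i acc
          rw [getD_succ_tail sa, getD_succ_tail sb]
          rfl
        rw [hfun]
      rw [hbody, ih sa.tail sb.tail hpre']
      by_cases hx : x = 1
      · subst hx
        simp only [List.getD_cons_zero]
        rw [astep_one, ds3_cons_one]
      · have h0 := hpre 0 (by simp)
        rcases h0 with h1 | h2
        · simp at h1; exact absurd h1 hx
        · obtain ⟨ha, hb⟩ := h2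
          cases sa with
          | nil => simp at ha
          | cons a sa' =>
              cases sb with
              | nil => simp at hb
              | cons b sb' =>
                  have hds : ds3 (x :: sh) (a :: sa') (b :: sb') = (x, a, b) :: ds3 sh sa' sb' := by
                    simp [ds3, hx]
                  simp only [List.getD_cons_zero, List.tail_cons, hds, List.foldr_cons]
                  exact astep_toRev x a b hx _

-- ===== VERDICT (by name: the statement is the Claim_ definition above) =====
theorem collapse_dims_spec : Claim_equal_collapse_dims := by
  intro shape sa sb _dom hpre
  unfold Spec_collapse_dims collapse_dims collapse_dims_alt
  by_cases hsh : shape = []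
  · subst hsh
    simp [ds3]
  · rw [if_neg hsh]
    rw [List.foldl_reverse]
    have hfold : List.foldr (fun x y => astep (shape.getD x 0) (sa.getD x 0) (sb.getD x 0) y) ([], [], [])
        (List.range shape.length) = toRev (List.foldr stepA [] (ds3 shape sa sb)) := loopA shape sa sb hpre
    rw [hfold]
    rw [foldr_stepA_eq_runs]
    set ds := ds3 shape sa sb with hds
    by_cases hd : ds = []
    · simp [hd, toRev, runs]
    · have hrne : runs ds ≠ [] := fun hcon => hd ((runs_nil_iff ds).mp hcon)
      have h1 : (toRev ((runs ds).map mg)).1 ≠ [] := by simp [toRev, hrne]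
      rw [if_neg hd, if_neg h1, segs_dc_eq_runs]
      simp [toRev, PySem.List.slice?_none_none_neg_one, mg, List.map_map, Function.comp]
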